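-- pv_equiv track=rewrite | github.com/icaromarley5/ffrpg4e-utils | tabs/enemy_creation.py | compute_level_attribute_info
-- ===== SOURCE A (Python) =====
-- LEVEL_ATTRIBUTES = {
--     10: {
--         "hp": [32, 64],
--         "mp": [10, 50],
--         "arm": [2, 12],
--         "marm": [2, 12],
--         "dmg_multiplier": [2, 4],
--     },
--     19: {
--         "hp": [80, 148],
--         "mp": [16, 64],
--         "arm": [4, 24],
--         "marm": [4, 24],
--         "dmg_multiplier": [3, 7],
--     },
--     27: {
--         "hp": [216, 288],
--         "mp": [24, 148],
--         "arm": [13, 48],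
--         "marm": [13, 48],
--         "dmg_multiplier": [5, 9],
--     },
--     36: {
--         "hp": [388, 468],
--         "mp": [62, 288],
--         "arm": [24, 84],
--         "marm": [24, 84],
--         "dmg_multiplier": [8, 12],
--     },
--     45: {
--         "hp": [604, 704],
--         "mp": [80, 468],
--         "arm": [37, 120],
--         "marm": [37, 120],
--         "dmg_multiplier": [10, 14],
--     },
--     54: {
--         "hp": [892, 1000],
--         "mp": [100, 704],
--         "arm": [62, 184],
--         "marm": [62, 184],
--         "dmg_multiplier": [13, 17],
--     },
--     63: {
--         "hp": [1208, 1332],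
--         "mp": [150, 1000],
--         "arm": [75, 245],
--         "marm": [75, 245],
--         "dmg_multiplier": [14, 20],
--     },
--     74: {
--         "hp": [1984, 2260],
--         "mp": [250, 1332],
--         "arm": [123, 368],
--         "marm": [123, 368],
--         "dmg_multiplier": [16, 24],
--     },
--     84: {
--         "hp": [2320, 2484],
--         "mp": [400, 2260],
--         "arm": [144, 452],
--         "marm": [144, 452],
--         "dmg_multiplier": [18, 26],
--     },
--     100: {
--         "hp": [2544, 2820],
--         "mp": [500, 2484],
--         "arm": [158, 555],
--         "marm": [158, 555],
--         "dmg_multiplier": [20, 35],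
--     },
-- }
--
-- def compute_level_attribute_info(attribute, monster_level):
--     max_level = min_level = 0
--     for level_bracket in LEVEL_ATTRIBUTES:
--         if monster_level < level_bracket:
--             max_level = level_bracket
--             break
--         min_level = level_bracket
--
--     return min_level, max_level, LEVEL_ATTRIBUTES[max_level][attribute]
-- ===== SOURCE B (Python) =====
-- import bisect
--
-- LEVELS = [10, 19, 27, 36, 45, 54, 63, 74, 84, 100]
--
-- ATTRIBUTE_COLUMNS = {
--     "hp": [[32, 64], [80, 148], [216, 288], [388, 468], [604, 704],
--            [892, 1000], [1208, 1332], [1984, 2260], [2320, 2484], [2544, 2820]],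
--     "mp": [[10, 50], [16, 64], [24, 148], [62, 288], [80, 468],
--            [100, 704], [150, 1000], [250, 1332], [400, 2260], [500, 2484]],
--     "arm": [[2, 12], [4, 24], [13, 48], [24, 84], [37, 120],
--             [62, 184], [75, 245], [123, 368], [144, 452], [158, 555]],
--     "dmg_multiplier": [[2, 4], [3, 7], [5, 9], [8, 12], [10, 14],
--                        [13, 17], [14, 20], [16, 24], [18, 26], [20, 35]],
-- }
-- # magic armor brackets are identical to physical armor in the source table
-- ATTRIBUTE_COLUMNS["marm"] = ATTRIBUTE_COLUMNS["arm"]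
--
--
-- def compute_level_attribute_info(attribute, monster_level):
--     column = ATTRIBUTE_COLUMNS[attribute]
--     idx = bisect.bisect_right(LEVELS, monster_level)
--     min_level = LEVELS[idx - 1] if idx else 0
--     return min_level, LEVELS[idx], column[idx]
-- ===== Notes on version B (the rewrite author's own statement) =====
-- stated objective: alternative
-- what changed: Transposes the level->attributes dict into per-attribute column tables (deduplicating marm=arm) and replaces the linear scan-with-break plus nested dict lookups by a single bisect_right binary search on the sorted level list, indexing the attribute column directly.
import Mathlib
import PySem

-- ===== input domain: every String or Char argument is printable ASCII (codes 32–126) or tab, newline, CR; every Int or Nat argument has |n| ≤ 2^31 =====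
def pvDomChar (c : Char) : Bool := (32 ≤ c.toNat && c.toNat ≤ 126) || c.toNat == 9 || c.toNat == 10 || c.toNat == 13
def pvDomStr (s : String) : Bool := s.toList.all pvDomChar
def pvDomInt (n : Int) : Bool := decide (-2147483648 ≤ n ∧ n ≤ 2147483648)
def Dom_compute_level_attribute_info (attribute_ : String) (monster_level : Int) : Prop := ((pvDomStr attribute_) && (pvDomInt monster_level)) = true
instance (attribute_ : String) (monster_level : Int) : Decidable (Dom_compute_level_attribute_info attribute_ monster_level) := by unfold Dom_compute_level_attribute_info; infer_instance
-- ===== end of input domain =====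

-- B transposes the level table into per-attribute columns (marm shares arm's column) and
-- replaces A's linear scan-with-break and nested dict lookups by a bisect_right binary
-- search on the sorted level list plus a direct column index (alternative decomposition).


-- ===== PORT A =====
-- A's module-level constant LEVEL_ATTRIBUTES (dict of dicts, insertion order)
def LEVEL_ATTRIBUTES : PySem.Dict Int (PySem.Dict String (List Int)) := PySem.Dict.ofList [
  (10,  PySem.Dict.ofList [("hp", [32, 64]),     ("mp", [10, 50]),    ("arm", [2, 12]),    ("marm", [2, 12]),    ("dmg_multiplier", [2, 4])]),
  (19,  PySem.Dict.ofList [("hp", [80, 148]),    ("mp", [16, 64]),    ("arm", [4, 24]),    ("marm", [4, 24]),    ("dmg_multiplier", [3, 7])]),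
  (27,  PySem.Dict.ofList [("hp", [216, 288]),   ("mp", [24, 148]),   ("arm", [13, 48]),   ("marm", [13, 48]),   ("dmg_multiplier", [5, 9])]),
  (36,  PySem.Dict.ofList [("hp", [388, 468]),   ("mp", [62, 288]),   ("arm", [24, 84]),   ("marm", [24, 84]),   ("dmg_multiplier", [8, 12])]),
  (45,  PySem.Dict.ofList [("hp", [604, 704]),   ("mp", [80, 468]),   ("arm", [37, 120]),  ("marm", [37, 120]),  ("dmg_multiplier", [10, 14])]),
  (54,  PySem.Dict.ofList [("hp", [892, 1000]),  ("mp", [100, 704]),  ("arm", [62, 184]),  ("marm", [62, 184]),  ("dmg_multiplier", [13, 17])]),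
  (63,  PySem.Dict.ofList [("hp", [1208, 1332]), ("mp", [150, 1000]), ("arm", [75, 245]),  ("marm", [75, 245]),  ("dmg_multiplier", [14, 20])]),
  (74,  PySem.Dict.ofList [("hp", [1984, 2260]), ("mp", [250, 1332]), ("arm", [123, 368]), ("marm", [123, 368]), ("dmg_multiplier", [16, 24])]),
  (84,  PySem.Dict.ofList [("hp", [2320, 2484]), ("mp", [400, 2260]), ("arm", [144, 452]), ("marm", [144, 452]), ("dmg_multiplier", [18, 26])]),
  (100, PySem.Dict.ofList [("hp", [2544, 2820]), ("mp", [500, 2484]), ("arm", [158, 555]), ("marm", [158, 555]), ("dmg_multiplier", [20, 35])])]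

-- A's 'for level_bracket in LEVEL_ATTRIBUTES: …' with the break: state = min_level;
-- returns (min_level, max_level) (max_level = 0 when the loop never breaks, as in A)
def pvLoopA : List Int → Int → Int → Int × Int
  | [], _, min_level => (min_level, 0)
  | level_bracket :: rest, monster_level, min_level =>
      if monster_level < level_bracket then (min_level, level_bracket)
      else pvLoopA rest monster_level level_bracket

-- LEVEL_ATTRIBUTES[max_level][attribute]: KeyError = default junk, excluded by Pre_
def compute_level_attribute_info (attribute_ : String) (monster_level : Int) : Int × Int × List Int :=
  let p := pvLoopA (PySem.Dict.keys LEVEL_ATTRIBUTES) monster_level 0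
  (p.1, p.2, (PySem.Dict.getD LEVEL_ATTRIBUTES p.2 PySem.Dict.empty).getD attribute_ [])

-- ===== PORT B =====
-- Source B's LEVELS and transposed ATTRIBUTE_COLUMNS (marm inserted as an alias of arm's column)
def pvLEVELS : List Int := [10, 19, 27, 36, 45, 54, 63, 74, 84, 100]

def ATTRIBUTE_COLUMNS : PySem.Dict String (List (List Int)) :=
  let base := PySem.Dict.ofList [
    ("hp", [[32, 64], [80, 148], [216, 288], [388, 468], [604, 704],
            [892, 1000], [1208, 1332], [1984, 2260], [2320, 2484], [2544, 2820]]),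
    ("mp", [[10, 50], [16, 64], [24, 148], [62, 288], [80, 468],
            [100, 704], [150, 1000], [250, 1332], [400, 2260], [500, 2484]]),
    ("arm", [[2, 12], [4, 24], [13, 48], [24, 84], [37, 120],
             [62, 184], [75, 245], [123, 368], [144, 452], [158, 555]]),
    ("dmg_multiplier", [[2, 4], [3, 7], [5, 9], [8, 12], [10, 14],
                        [13, 17], [14, 20], [16, 24], [18, 26], [20, 35]])]
  base.insert "marm" (base.getD "arm" [])

-- KeyError on ATTRIBUTE_COLUMNS[attribute] and IndexError on LEVELS[idx] (monster_level ≥ 100)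
-- are both excluded by Pre_; the pyGetD/getD defaults are junk outside it
def compute_level_attribute_info_alt (attribute_ : String) (monster_level : Int) : Int × Int × List Int :=
  let column := PySem.Dict.getD ATTRIBUTE_COLUMNS attribute_ []
  let idx : Nat := PySem.List.bisectRight pvLEVELS monster_level
  let min_level : Int := if idx ≠ 0 then PySem.List.pyGetD pvLEVELS ((idx : Int) - 1) 0 else 0
  (min_level, PySem.List.pyGetD pvLEVELS (idx : Int) 0, PySem.List.pyGetD column (idx : Int) [])

-- ===== PRECONDITION & SPEC =====
-- Pre_ excludes exactly the inputs where A raises KeyError: monster_level ≥ 100 leaves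
-- max_level = 0 and LEVEL_ATTRIBUTES[0] raises, and an unknown attribute name raises.
def Pre_compute_level_attribute_info (attribute_ : String) (monster_level : Int) : Prop :=
  monster_level < 100 ∧
    (attribute_ = "hp" ∨ attribute_ = "mp" ∨ attribute_ = "arm" ∨ attribute_ = "marm" ∨
      attribute_ = "dmg_multiplier")
instance (attribute_ : String) (monster_level : Int) : Decidable (Pre_compute_level_attribute_info attribute_ monster_level) := by unfold Pre_compute_level_attribute_info; infer_instance

def pvWitness_compute_level_attribute_info : String × Int := ("hp", 25)

def Spec_compute_level_attribute_info (attribute_ : String) (monster_level : Int) (out : Int × Int × List Int) : Prop := out = compute_level_attribute_info_alt attribute_ monster_level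
instance (attribute_ : String) (monster_level : Int) (out : Int × Int × List Int) : Decidable (Spec_compute_level_attribute_info attribute_ monster_level out) := by unfold Spec_compute_level_attribute_info; infer_instance

-- ===== CLAIM =====
def Claim_equal_compute_level_attribute_info : Prop := ∀ (attribute_ : String) (monster_level : Int), Dom_compute_level_attribute_info attribute_ monster_level → Pre_compute_level_attribute_info attribute_ monster_level → Spec_compute_level_attribute_info attribute_ monster_level (compute_level_attribute_info attribute_ monster_level)

-- ===== LEMMAS AND PROOFS =====

-- the transposed column agrees with A's nested dict lookup at every bracket index
lemma col_eq (attribute_ : String)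
    (h : attribute_ = "hp" ∨ attribute_ = "mp" ∨ attribute_ = "arm" ∨ attribute_ = "marm" ∨
      attribute_ = "dmg_multiplier") (n : Nat) (hn : n < 10) :
    PySem.List.pyGetD (PySem.Dict.getD ATTRIBUTE_COLUMNS attribute_ []) (n : Int) [] =
    (PySem.Dict.getD LEVEL_ATTRIBUTES (PySem.List.pyGetD pvLEVELS (n : Int) 0) PySem.Dict.empty).getD attribute_ [] := by
  rcases h with h | h | h | h | h <;> subst h <;> interval_cases n <;> decide

-- ===== VERDICT =====
theorem compute_level_attribute_info_spec : Claim_equal_compute_level_attribute_info := by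
  intro attr lvl _dom hpre
  obtain ⟨hlt, hattr⟩ := hpre
  unfold Spec_compute_level_attribute_info compute_level_attribute_info compute_level_attribute_info_alt
  have hkeys : PySem.Dict.keys LEVEL_ATTRIBUTES = pvLEVELS := by decide
  simp only [hkeys]
  obtain ⟨hle, hlo, hhi⟩ := PySem.List.bisectRight_spec pvLEVELS lvl (by decide)
  set n := PySem.List.bisectRight pvLEVELS lvl with hn
  clear hn
  have hlen : pvLEVELS.length = 10 := by decide
  rw [hlen] at hle
  interval_cases n
  ·
    have h2 : lvl < 10 := by have := hhi 0 (by decide) (by omega); simpa [pvLEVELS] using this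
    have hc := col_eq attr hattr 0 (by norm_num)
    norm_num [pvLEVELS, pvLoopA, PySem.List.pyGetD, PySem.List.pyGet?, PySem.List.pyIdx?, Int.toNat, List.getElem_cons_succ, List.getElem_cons_zero] at hc
    norm_num [pvLEVELS, pvLoopA, PySem.List.pyGetD, PySem.List.pyGet?, PySem.List.pyIdx?, Int.toNat, List.getElem_cons_succ, List.getElem_cons_zero, show lvl < 10 from by omega, hc]
  ·
    have h1 : (10:Int) ≤ lvl := by have := hlo 0 (by decide) (by omega); simpa [pvLEVELS] using this
    have h2 : lvl < 19 := by have := hhi 1 (by decide) (by omega); simpa [pvLEVELS] using this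
    have hc := col_eq attr hattr 1 (by norm_num)
    norm_num [pvLEVELS, pvLoopA, PySem.List.pyGetD, PySem.List.pyGet?, PySem.List.pyIdx?, Int.toNat, List.getElem_cons_succ, List.getElem_cons_zero] at hc
    norm_num [pvLEVELS, pvLoopA, PySem.List.pyGetD, PySem.List.pyGet?, PySem.List.pyIdx?, Int.toNat, List.getElem_cons_succ, List.getElem_cons_zero, show ¬(lvl < 10) from by omega, show lvl < 19 from by omega, hc]
  ·
    have h1 : (19:Int) ≤ lvl := by have := hlo 1 (by decide) (by omega); simpa [pvLEVELS] using this
    have h2 : lvl < 27 := by have := hhi 2 (by decide) (by omega); simpa [pvLEVELS] using this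
    have hc := col_eq attr hattr 2 (by norm_num)
    norm_num [pvLEVELS, pvLoopA, PySem.List.pyGetD, PySem.List.pyGet?, PySem.List.pyIdx?, Int.toNat, List.getElem_cons_succ, List.getElem_cons_zero] at hc
    norm_num [pvLEVELS, pvLoopA, PySem.List.pyGetD, PySem.List.pyGet?, PySem.List.pyIdx?, Int.toNat, List.getElem_cons_succ, List.getElem_cons_zero, show ¬(lvl < 10) from by omega, show ¬(lvl < 19) from by omega, show lvl < 27 from by omega, hc]
  ·
    have h1 : (27:Int) ≤ lvl := by have := hlo 2 (by decide) (by omega); simpa [pvLEVELS] using this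
    have h2 : lvl < 36 := by have := hhi 3 (by decide) (by omega); simpa [pvLEVELS] using this
    have hc := col_eq attr hattr 3 (by norm_num)
    norm_num [pvLEVELS, pvLoopA, PySem.List.pyGetD, PySem.List.pyGet?, PySem.List.pyIdx?, Int.toNat, List.getElem_cons_succ, List.getElem_cons_zero] at hc
    norm_num [pvLEVELS, pvLoopA, PySem.List.pyGetD, PySem.List.pyGet?, PySem.List.pyIdx?, Int.toNat, List.getElem_cons_succ, List.getElem_cons_zero, show ¬(lvl < 10) from by omega, show ¬(lvl < 19) from by omega, show ¬(lvl < 27) from by omega, show lvl < 36 from by omega, hc]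
  ·
    have h1 : (36:Int) ≤ lvl := by have := hlo 3 (by decide) (by omega); simpa [pvLEVELS] using this
    have h2 : lvl < 45 := by have := hhi 4 (by decide) (by omega); simpa [pvLEVELS] using this
    have hc := col_eq attr hattr 4 (by norm_num)
    norm_num [pvLEVELS, pvLoopA, PySem.List.pyGetD, PySem.List.pyGet?, PySem.List.pyIdx?, Int.toNat, List.getElem_cons_succ, List.getElem_cons_zero] at hc
    norm_num [pvLEVELS, pvLoopA, PySem.List.pyGetD, PySem.List.pyGet?, PySem.List.pyIdx?, Int.toNat, List.getElem_cons_succ, List.getElem_cons_zero, show ¬(lvl < 10) from by omega, show ¬(lvl < 19) from by omega, show ¬(lvl < 27) from by omega, show ¬(lvl < 36) from by omega, show lvl < 45 from by omega, hc]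
  ·
    have h1 : (45:Int) ≤ lvl := by have := hlo 4 (by decide) (by omega); simpa [pvLEVELS] using this
    have h2 : lvl < 54 := by have := hhi 5 (by decide) (by omega); simpa [pvLEVELS] using this
    have hc := col_eq attr hattr 5 (by norm_num)
    norm_num [pvLEVELS, pvLoopA, PySem.List.pyGetD, PySem.List.pyGet?, PySem.List.pyIdx?, Int.toNat, List.getElem_cons_succ, List.getElem_cons_zero] at hc
    norm_num [pvLEVELS, pvLoopA, PySem.List.pyGetD, PySem.List.pyGet?, PySem.List.pyIdx?, Int.toNat, List.getElem_cons_succ, List.getElem_cons_zero, show ¬(lvl < 10) from by omega, show ¬(lvl < 19) from by omega, show ¬(lvl < 27) from by omega, show ¬(lvl < 36) from by omega, show ¬(lvl < 45) from by omega, show lvl < 54 from by omega, hc]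
  ·
    have h1 : (54:Int) ≤ lvl := by have := hlo 5 (by decide) (by omega); simpa [pvLEVELS] using this
    have h2 : lvl < 63 := by have := hhi 6 (by decide) (by omega); simpa [pvLEVELS] using this
    have hc := col_eq attr hattr 6 (by norm_num)
    norm_num [pvLEVELS, pvLoopA, PySem.List.pyGetD, PySem.List.pyGet?, PySem.List.pyIdx?, Int.toNat, List.getElem_cons_succ, List.getElem_cons_zero] at hc
    norm_num [pvLEVELS, pvLoopA, PySem.List.pyGetD, PySem.List.pyGet?, PySem.List.pyIdx?, Int.toNat, List.getElem_cons_succ, List.getElem_cons_zero, show ¬(lvl < 10) from by omega, show ¬(lvl < 19) from by omega, show ¬(lvl < 27) from by omega, show ¬(lvl < 36) from by omega, show ¬(lvl < 45) from by omega, show ¬(lvl < 54) from by omega, show lvl < 63 from by omega, hc]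
  ·
    have h1 : (63:Int) ≤ lvl := by have := hlo 6 (by decide) (by omega); simpa [pvLEVELS] using this
    have h2 : lvl < 74 := by have := hhi 7 (by decide) (by omega); simpa [pvLEVELS] using this
    have hc := col_eq attr hattr 7 (by norm_num)
    norm_num [pvLEVELS, pvLoopA, PySem.List.pyGetD, PySem.List.pyGet?, PySem.List.pyIdx?, Int.toNat, List.getElem_cons_succ, List.getElem_cons_zero] at hc
    norm_num [pvLEVELS, pvLoopA, PySem.List.pyGetD, PySem.List.pyGet?, PySem.List.pyIdx?, Int.toNat, List.getElem_cons_succ, List.getElem_cons_zero, show ¬(lvl < 10) from by omega, show ¬(lvl < 19) from by omega, show ¬(lvl < 27) from by omega, show ¬(lvl < 36) from by omega, show ¬(lvl < 45) from by omega, show ¬(lvl < 54) from by omega, show ¬(lvl < 63) from by omega, show lvl < 74 from by omega, hc]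
  ·
    have h1 : (74:Int) ≤ lvl := by have := hlo 7 (by decide) (by omega); simpa [pvLEVELS] using this
    have h2 : lvl < 84 := by have := hhi 8 (by decide) (by omega); simpa [pvLEVELS] using this
    have hc := col_eq attr hattr 8 (by norm_num)
    norm_num [pvLEVELS, pvLoopA, PySem.List.pyGetD, PySem.List.pyGet?, PySem.List.pyIdx?, Int.toNat, List.getElem_cons_succ, List.getElem_cons_zero] at hc
    norm_num [pvLEVELS, pvLoopA, PySem.List.pyGetD, PySem.List.pyGet?, PySem.List.pyIdx?, Int.toNat, List.getElem_cons_succ, List.getElem_cons_zero, show ¬(lvl < 10) from by omega, show ¬(lvl < 19) from by omega, show ¬(lvl < 27) from by omega, show ¬(lvl < 36) from by omega, show ¬(lvl < 45) from by omega, show ¬(lvl < 54) from by omega, show ¬(lvl < 63) from by omega, show ¬(lvl < 74) from by omega, show lvl < 84 from by omega, hc]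
  ·
    have h1 : (84:Int) ≤ lvl := by have := hlo 8 (by decide) (by omega); simpa [pvLEVELS] using this
    have h2 : lvl < 100 := by have := hhi 9 (by decide) (by omega); simpa [pvLEVELS] using this
    have hc := col_eq attr hattr 9 (by norm_num)
    norm_num [pvLEVELS, pvLoopA, PySem.List.pyGetD, PySem.List.pyGet?, PySem.List.pyIdx?, Int.toNat, List.getElem_cons_succ, List.getElem_cons_zero] at hc
    norm_num [pvLEVELS, pvLoopA, PySem.List.pyGetD, PySem.List.pyGet?, PySem.List.pyIdx?, Int.toNat, List.getElem_cons_succ, List.getElem_cons_zero, show ¬(lvl < 10) from by omega, show ¬(lvl < 19) from by omega, show ¬(lvl < 27) from by omega, show ¬(lvl < 36) from by omega, show ¬(lvl < 45) from by omega, show ¬(lvl < 54) from by omega, show ¬(lvl < 63) from by omega, show ¬(lvl < 74) from by omega, show ¬(lvl < 84) from by omega, show lvl < 100 from by omega, hc]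
  · exfalso; have := hlo 9 (by decide) (by omega); simp [pvLEVELS] at this; omega
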